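-- pv_equiv track=rewrite | github.com/phosphino/DeckAggregator | Deck_Parser.py | expand_decks
-- ===== SOURCE A (Python) =====
-- def expand_decks(decks):
--     revised_decks = []
--     for deck in decks:
--         revised_deck = []
--         for entry in deck:
--             for i in range(entry[0]):
--                 revised_deck.append((i + 1, entry[1]))
--         revised_deck = sorted(revised_deck, key=lambda x: x[1])
--         revised_deck = sorted(revised_deck, key=lambda x: x[0])
--         revised_decks.append(revised_deck)
--     return revised_decks
-- ===== SOURCE B (Python) =====
-- def expand_decks(decks):
--     out = []
--     for deck in decks:
--         by_card = sorted(deck, key=lambda e: e[1])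
--         max_count = max((c for c, _ in deck), default=0)
--         out.append([(i, card) for i in range(1, max_count + 1)
--                     for count, card in by_card if count >= i])
--     return out
-- ===== Notes on version B (the rewrite author's own statement) =====
-- stated objective: alternative
-- what changed: Instead of expanding every (count, card) entry into count copies and then stable-sorting the expanded list twice, B sorts only the compact entries once by card and emits the (index, card) pairs directly in order by iterating i = 1..max_count and taking the entries with count >= i.
import Mathlib
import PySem

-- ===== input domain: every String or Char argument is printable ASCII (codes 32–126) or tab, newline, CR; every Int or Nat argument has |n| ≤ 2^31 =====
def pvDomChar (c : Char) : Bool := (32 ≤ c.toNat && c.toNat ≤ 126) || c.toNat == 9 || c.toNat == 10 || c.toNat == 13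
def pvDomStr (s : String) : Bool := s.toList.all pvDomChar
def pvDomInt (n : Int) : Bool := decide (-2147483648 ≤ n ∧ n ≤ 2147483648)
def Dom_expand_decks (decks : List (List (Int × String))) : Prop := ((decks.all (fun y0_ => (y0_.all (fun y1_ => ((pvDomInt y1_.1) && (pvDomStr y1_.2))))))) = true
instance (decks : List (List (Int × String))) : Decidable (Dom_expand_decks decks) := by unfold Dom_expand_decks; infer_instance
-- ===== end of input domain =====

-- B replaces A's expand-then-double-stable-sort per deck by one sort of the compact
-- entries by card plus a direct ordered emission over i = 1..max_count (objective: alternative).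

-- ===== PORT A =====
def expand_decks (decks : List (List (Int × String))) : List (List (Int × String)) :=
  decks.foldl (fun revised_decks deck =>
    let revised_deck :=
      deck.foldl (fun rd entry =>
        (PySem.List.pyRange 0 entry.1 1).foldl (fun rd i => rd ++ [(i + 1, entry.2)]) rd) []
    let revised_deck1 := PySem.List.sorted revised_deck (fun x => x.2) false
    let revised_deck2 := PySem.List.sorted revised_deck1 (fun x => x.1) false
    revised_decks ++ [revised_deck2]) []

-- ===== PORT B =====
def expand_decks_alt (decks : List (List (Int × String))) : List (List (Int × String)) :=
  decks.map (fun deck =>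
    let byCard := PySem.List.sorted deck (fun e => e.2) false
    let maxCount := PySem.List.maxD (deck.map (fun e => e.1)) (fun c => c) 0
    (PySem.List.pyRange 1 (maxCount + 1) 1).flatMap (fun i =>
      (byCard.filter (fun e => decide (i ≤ e.1))).map (fun e => (i, e.2))))

-- ===== PRECONDITION & SPEC =====
def Spec_expand_decks (decks : List (List (Int × String))) (out : List (List (Int × String))) : Prop := out = expand_decks_alt decks
instance (decks : List (List (Int × String))) (out : List (List (Int × String))) : Decidable (Spec_expand_decks decks out) := by unfold Spec_expand_decks; infer_instance

-- ===== CLAIM (what is proved, stated in full; the proofs are below) =====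
def Claim_equal_expand_decks : Prop := ∀ (decks : List (List (Int × String))), Dom_expand_decks decks → Spec_expand_decks decks (expand_decks decks)

-- ===== LEMMAS AND PROOFS =====

-- the lexicographic order (index, then card) that both per-deck results satisfy
def pvR (a b : Int × String) : Prop := a.1 < b.1 ∨ (a.1 = b.1 ∧ a.2 ≤ b.2)

-- A's expansion loop of one deck, as a flatMap
lemma expandA_eq (deck : List (Int × String)) :
    deck.foldl (fun rd entry =>
        (PySem.List.pyRange 0 entry.1 1).foldl (fun rd i => rd ++ [(i + 1, entry.2)]) rd) []
    = deck.flatMap (fun e => (PySem.List.pyRange 0 e.1 1).map (fun i => (i + 1, e.2))) := by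
  simp only [PySem.List.foldl_append_singleton_eq_map]
  rw [PySem.List.foldl_append_eq_flatMap, List.nil_append]

-- stability of the outer sort: inserting by fst into a pvR-sorted list whose snds are all ≤ x.2
lemma insertBy_pvR (x : Int × String) (acc : List (Int × String))
    (hacc : acc.Pairwise pvR) (hx : ∀ y ∈ acc, y.2 ≤ x.2) :
    (PySem.List.insertBy (fun a b => decide (a.1 < b.1)) x acc).Pairwise pvR := by
  induction acc with
  | nil => simp [PySem.List.insertBy]
  | cons y ys ih =>
    rw [PySem.List.insertBy]
    by_cases h : x.1 < y.1
    · simp only [h, decide_true, if_true]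
      refine List.Pairwise.cons ?_ hacc
      intro z hz
      rcases List.mem_cons.mp hz with rfl | hz
      · exact Or.inl h
      · rcases hacc with _ | ⟨hy, _⟩
        rcases hy z hz with h' | ⟨h', _⟩ <;> exact Or.inl (by omega)
    · simp only [h, decide_false]
      rcases hacc with _ | ⟨hy, hys⟩
      refine List.Pairwise.cons ?_ (ih hys (fun z hz => hx z (List.mem_cons_of_mem _ hz)))
      intro z hz
      rcases (PySem.List.mem_insertBy _ _ _ _).mp hz with rfl | hz
      · rcases lt_or_ge y.1 z.1 with h' | h'
        · exact Or.inl h'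
        · exact Or.inr ⟨by omega, hx y (List.mem_cons_self)⟩
      · exact hy z hz

lemma sorted_fst_pvR (xs : List (Int × String)) (h : xs.Pairwise (fun a b => a.2 ≤ b.2)) :
    (PySem.List.sorted xs (fun e => e.1) false).Pairwise pvR := by
  rw [PySem.List.sorted_eq_foldl_insertBy]
  suffices H : ∀ (l : List (Int × String)) (acc : List (Int × String)),
      l.Pairwise (fun a b => a.2 ≤ b.2) → acc.Pairwise pvR →
      (∀ y ∈ acc, ∀ x ∈ l, y.2 ≤ x.2) →
      (l.foldl (fun acc x => PySem.List.insertBy (fun a b => decide (a.1 < b.1)) x acc) acc).Pairwise pvR by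
    exact H xs [] h (by simp) (by simp)
  intro l
  induction l with
  | nil => intro acc _ hacc _; simpa using hacc
  | cons x l ih =>
    intro acc hl hacc hcross
    rcases hl with _ | ⟨hx, hl⟩
    simp only [List.foldl_cons]
    refine ih _ hl (insertBy_pvR x acc hacc (fun y hy => hcross y hy x List.mem_cons_self)) ?_
    intro y hy z hz
    rcases (PySem.List.mem_insertBy _ _ _ _).mp hy with rfl | hy
    · exact hx z hz
    · exact hcross y hy z (List.mem_cons_of_mem _ hz)

-- B's block for index i is pvR-sorted
lemma block_pairwise (byCard : List (Int × String)) (h : byCard.Pairwise (fun a b => a.2 ≤ b.2)) (i : Int) :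
    ((byCard.filter (fun e => decide (i ≤ e.1))).map (fun e => (i, e.2))).Pairwise pvR := by
  refine List.Pairwise.map _ ?_ (h.filter _)
  intro a b hab
  exact Or.inr ⟨rfl, hab⟩

-- B's whole per-deck output is pvR-sorted
lemma bDeck_pairwise (byCard : List (Int × String)) (h : byCard.Pairwise (fun a b => a.2 ≤ b.2)) (M : Int) :
    ((PySem.List.pyRange 1 (M + 1) 1).flatMap (fun i =>
      (byCard.filter (fun e => decide (i ≤ e.1))).map (fun e => (i, e.2)))).Pairwise pvR := by
  rw [List.flatMap_def, List.pairwise_flatten]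
  constructor
  · intro l' hl'
    rcases List.mem_map.mp hl' with ⟨i, _, rfl⟩
    exact block_pairwise byCard h i
  · rw [List.pairwise_map]
    refine (PySem.List.pairwise_lt_pyRange_one _ _).imp ?_
    intro i j hij x hx y hy
    rcases List.mem_map.mp hx with ⟨a, _, rfl⟩
    rcases List.mem_map.mp hy with ⟨b, _, rfl⟩
    exact Or.inl hij

-- exchange sub-lemma: a flatMap of conditional heads peels into filtered heads ++ tails
lemma peel_perm {β : Type} (I : List Int) (p : Int → Bool) (f : Int → β) (g : Int → List β) :
    (I.flatMap (fun i => (if p i then [f i] else []) ++ g i)).Perm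
    ((I.filter p).map f ++ I.flatMap g) := by
  induction I with
  | nil => simp
  | cons i I ih =>
    simp only [List.flatMap_cons, List.filter_cons]
    have h2 : (g i ++ ((I.filter p).map f ++ I.flatMap g)).Perm
        ((I.filter p).map f ++ (g i ++ I.flatMap g)) := by
      rw [← List.append_assoc, ← List.append_assoc]
      exact (List.perm_append_comm).append_right _
    have h12 := (ih.append_left (g i)).trans h2
    by_cases hp : p i
    · simp only [hp, if_true, List.map_cons, List.cons_append, List.nil_append]
      exact h12.cons _
    · simp only [hp]
      exact h12

-- exchange lemma: per-entry expansion ~ per-index emission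
lemma swap_perm (l : List (Int × String)) (I : List Int) :
    (l.flatMap (fun e => (I.filter (fun i => decide (i ≤ e.1))).map (fun i => (i, e.2)))).Perm
    (I.flatMap (fun i => (l.filter (fun e => decide (i ≤ e.1))).map (fun e => (i, e.2)))) := by
  induction l with
  | nil => simp
  | cons e l ih =>
    simp only [List.flatMap_cons, List.filter_cons]
    have hrw : (I.flatMap fun i =>
        ((if decide (i ≤ e.1) then e :: l.filter (fun e => decide (i ≤ e.1))
          else l.filter (fun e => decide (i ≤ e.1))).map (fun e => (i, e.2))))
        = I.flatMap fun i =>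
          ((if decide (i ≤ e.1) then [(i, e.2)] else []) ++
            (l.filter (fun e => decide (i ≤ e.1))).map (fun e => (i, e.2))) := by
      refine List.flatMap_congr ?_
      intro i _
      by_cases hi : i ≤ e.1 <;> simp [hi]
    rw [hrw]
    refine ((ih.append_left _).trans ?_)
    exact (peel_perm I (fun i => decide (i ≤ e.1)) (fun i => (i, e.2))
      (fun i => (l.filter (fun e => decide (i ≤ e.1))).map (fun e => (i, e.2)))).symm

-- one entry's expansion is the filtered index range, when its count is below the bound
lemma entry_range_eq (c : Int) (s : String) (M : Int) (hc : c ≤ M) :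
    (PySem.List.pyRange 0 c 1).map (fun i => (i + 1, s))
    = ((PySem.List.pyRange 1 (M + 1) 1).filter (fun i => decide (i ≤ c))).map (fun i => (i, s)) := by
  have hfil : (PySem.List.pyRange 1 (M + 1) 1).filter (fun i => decide (i ≤ c))
      = PySem.List.pyRange 1 (c + 1) 1 := by
    by_cases hc0 : 0 ≤ c
    · rw [PySem.List.pyRange_one_append 1 (c + 1) (M + 1) (by omega) (by omega), List.filter_append]
      rw [List.filter_eq_self.mpr, List.filter_eq_nil_iff.mpr, List.append_nil]
      · intro i hi
        have := PySem.List.mem_pyRange_one.mp hi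
        simp; omega
      · intro i hi
        have := PySem.List.mem_pyRange_one.mp hi
        simp; omega
    · rw [PySem.List.pyRange_one_eq_nil (a := 1) (b := c + 1) (by omega)]
      refine List.filter_eq_nil_iff.mpr ?_
      intro i hi
      have := PySem.List.mem_pyRange_one.mp hi
      simp; omega
  rw [hfil, PySem.List.pyRange_one, PySem.List.pyRange_one, List.map_map, List.map_map]
  have : (c + 1 - 1).toNat = (c - 0).toNat := by omega
  rw [this]
  refine List.map_congr_left ?_
  intro k _
  simp only [Function.comp]
  refine Prod.ext ?_ rfl
  simp; omega

lemma maxD_ge (xs : List Int) (d : Int) : ∀ x ∈ xs, x ≤ PySem.List.maxD xs (fun c => c) d := by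
  intro x hx
  rcases hm : PySem.List.max? xs (fun c => c) with _ | m
  · rw [(PySem.List.max?_eq_none_iff xs _).mp hm] at hx
    simp at hx
  · have := PySem.List.max?_isMax hm x hx
    simpa [PySem.List.maxD, hm] using this

-- the per-deck equality
lemma deck_eq (deck : List (Int × String)) :
    PySem.List.sorted
      (PySem.List.sorted
        (deck.foldl (fun rd entry =>
          (PySem.List.pyRange 0 entry.1 1).foldl (fun rd i => rd ++ [(i + 1, entry.2)]) rd) [])
        (fun x => x.2) false)
      (fun x => x.1) false
    = (PySem.List.pyRange 1 (PySem.List.maxD (deck.map (fun e => e.1)) (fun c => c) 0 + 1) 1).flatMap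
        (fun i => ((PySem.List.sorted deck (fun e => e.2) false).filter
            (fun e => decide (i ≤ e.1))).map (fun e => (i, e.2))) := by
  have hanti : ∀ (a b : Int × String), pvR a b → pvR b a → a = b := by
    intro a b hab hba
    rcases hab with h1 | ⟨h1, h2⟩ <;> rcases hba with h3 | ⟨h3, h4⟩ <;>
      first
        | omega
        | exact Prod.ext h1 (le_antisymm h2 h4)
  rw [expandA_eq]
  set byCard := PySem.List.sorted deck (fun e => e.2) false with hbc
  set M := PySem.List.maxD (deck.map (fun e => e.1)) (fun c => c) 0 with hM
  set I := PySem.List.pyRange 1 (M + 1) 1 with hI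
  -- A's side is pvR-sorted (stability of the second sort)
  have hA : (PySem.List.sorted
      (PySem.List.sorted
        (deck.flatMap (fun e => (PySem.List.pyRange 0 e.1 1).map (fun i => (i + 1, e.2))))
        (fun x => x.2) false) (fun x => x.1) false).Pairwise pvR :=
    sorted_fst_pvR _ (PySem.List.sorted_pairwise _ _)
  -- B's side is pvR-sorted
  have hB : (I.flatMap (fun i =>
      (byCard.filter (fun e => decide (i ≤ e.1))).map (fun e => (i, e.2)))).Pairwise pvR :=
    bDeck_pairwise byCard (PySem.List.sorted_pairwise _ _) M
  -- the two sides are permutations of each other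
  have hmax : ∀ e ∈ byCard, e.1 ≤ M := by
    intro e he
    exact maxD_ge (deck.map (fun e => e.1)) 0 e.1
      (List.mem_map.mpr ⟨e, (PySem.List.mem_sorted _ _ _ _).mp he, rfl⟩)
  have hcongr : byCard.flatMap (fun e => (PySem.List.pyRange 0 e.1 1).map (fun i => (i + 1, e.2)))
      = byCard.flatMap (fun e => (I.filter (fun i => decide (i ≤ e.1))).map (fun i => (i, e.2))) :=
    List.flatMap_congr (fun e he => entry_range_eq e.1 e.2 M (hmax e he))
  have hperm : (PySem.List.sorted
      (PySem.List.sorted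
        (deck.flatMap (fun e => (PySem.List.pyRange 0 e.1 1).map (fun i => (i + 1, e.2))))
        (fun x => x.2) false) (fun x => x.1) false).Perm
      (I.flatMap (fun i =>
        (byCard.filter (fun e => decide (i ≤ e.1))).map (fun e => (i, e.2)))) := by
    refine ((PySem.List.sorted_perm _ _ _).trans (PySem.List.sorted_perm _ _ _)).trans ?_
    refine (((PySem.List.sorted_perm deck (fun e => e.2) false).symm.flatMap
      (fun _ _ => List.Perm.refl _)).trans ?_)
    rw [hcongr]
    exact swap_perm byCard I
  exact List.Perm.eq_of_pairwise (fun a b _ _ => hanti a b) hA hB hperm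

-- ===== VERDICT (by name: the statement is the Claim_ definition above) =====
theorem expand_decks_spec : Claim_equal_expand_decks := by
  intro decks _
  unfold Spec_expand_decks expand_decks expand_decks_alt
  rw [PySem.List.foldl_append_singleton_eq_map, List.nil_append]
  exact List.map_congr_left (fun deck _ => deck_eq deck)
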